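-- pv_equiv track=rewrite | github.com/blockchaindailyai/UTBot | backtesting/local_chart.py | _compact_trade_reason
-- ===== SOURCE A (Python) =====
-- def _compact_trade_reason(reason: str | None) -> str | None:
--     normalized = str(reason or "").strip()
--     if normalized == "":
--         return None
--
--     direct_mapping = {
--         "Bullish 1W": "1W",
--         "Bearish 1W": "1W",
--         "Bullish Fractal": "F",
--         "Bearish Fractal": "F",
--         "Bullish Add-on Fractal": "AF",
--         "Bearish Add-on Fractal": "AF",
--         "Bullish 1W-R": "1W-R",
--         "Bearish 1W-R": "1W-R",
--         "Bullish 1W Reversal": "1W-R",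
--         "Bearish 1W Reversal": "1W-R",
--         "Bullish 2W": "2W",
--         "Bearish 2W": "2W",
--         "Bullish 3W": None,
--         "Bearish 3W": None,
--         "Strategy Profit Protection Green Gator": "G",
--         "Strategy Profit Protection Red Gator": "R",
--         "Green Gator PP": "G",
--         "Red Gator PP": "R",
--         "Green Gator": "G",
--         "Red Gator": "R",
--         "Strategy Stop Loss Bullish 1W": "S",
--         "Strategy Stop Loss Bearish 1W": "S",
--         "1W Reversal Stop": "S",
--         "NTD Entry Stop": "S",
--         "Williams Zone PP": "Z",
--         "protective_stop": "S",
--         "take_profit": "TP",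
--         "Reduce": "RED",
--     }
--     if normalized in direct_mapping:
--         return direct_mapping[normalized]
--
--     if normalized.startswith("Signal Intent Flat from "):
--         return _compact_trade_reason(normalized.removeprefix("Signal Intent Flat from "))
--     if normalized.startswith("Signal Intent Flip to "):
--         return _compact_trade_reason(normalized.removeprefix("Signal Intent Flip to "))
--     if normalized.startswith("Signal Intent Reduce from "):
--         return _compact_trade_reason(normalized.removeprefix("Signal Intent Reduce from "))
--     if normalized.startswith("Strategy Exit Reason: "):
--         return _compact_trade_reason(normalized.removeprefix("Strategy Exit Reason: "))
--     if normalized.startswith("Strategy Reversal to "):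
--         return _compact_trade_reason(normalized.removeprefix("Strategy Reversal to "))
--     if normalized.startswith("Bullish ") or normalized.startswith("Bearish "):
--         parts = normalized.split(" ", maxsplit=1)
--         if len(parts) == 2:
--             return _compact_trade_reason(parts[1]) or parts[1]
--     return normalized
-- ===== SOURCE B (Python) =====
-- _MAPPING = {
--     "Bullish 1W": "1W",
--     "Bearish 1W": "1W",
--     "Bullish Fractal": "F",
--     "Bearish Fractal": "F",
--     "Bullish Add-on Fractal": "AF",
--     "Bearish Add-on Fractal": "AF",
--     "Bullish 1W-R": "1W-R",
--     "Bearish 1W-R": "1W-R",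
--     "Bullish 1W Reversal": "1W-R",
--     "Bearish 1W Reversal": "1W-R",
--     "Bullish 2W": "2W",
--     "Bearish 2W": "2W",
--     "Bullish 3W": None,
--     "Bearish 3W": None,
--     "Strategy Profit Protection Green Gator": "G",
--     "Strategy Profit Protection Red Gator": "R",
--     "Green Gator PP": "G",
--     "Red Gator PP": "R",
--     "Green Gator": "G",
--     "Red Gator": "R",
--     "Strategy Stop Loss Bullish 1W": "S",
--     "Strategy Stop Loss Bearish 1W": "S",
--     "1W Reversal Stop": "S",
--     "NTD Entry Stop": "S",
--     "Williams Zone PP": "Z",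
--     "protective_stop": "S",
--     "take_profit": "TP",
--     "Reduce": "RED",
-- }
--
-- _PREFIXES = (
--     "Signal Intent Flat from ",
--     "Signal Intent Flip to ",
--     "Signal Intent Reduce from ",
--     "Strategy Exit Reason: ",
--     "Strategy Reversal to ",
-- )
--
--
-- def _compact_trade_reason(reason):
--     current = reason or ""
--     fallback = None
--     while True:
--         current = current.strip()
--         if not current:
--             return fallback
--         if current in _MAPPING:
--             return _MAPPING[current] or fallback
--         for prefix in _PREFIXES:
--             if current.startswith(prefix):
--                 current = current[len(prefix):]
--                 break
--         else:
--             if current.startswith(("Bullish ", "Bearish ")):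
--                 # both sentinel prefixes have length 8 and their first space at index 7
--                 current = fallback = current[8:]
--             else:
--                 return current
-- ===== Notes on version B (the rewrite author's own statement) =====
-- stated objective: alternative
-- what changed: Replaces A's recursion with or-chained fallbacks and split-at-first-space by a single while loop over a mutable current string that keeps one most-recent-fallback variable, drives the five plain prefixes from a table, and slices off the first eight characters instead of splitting.
import Mathlib
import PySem

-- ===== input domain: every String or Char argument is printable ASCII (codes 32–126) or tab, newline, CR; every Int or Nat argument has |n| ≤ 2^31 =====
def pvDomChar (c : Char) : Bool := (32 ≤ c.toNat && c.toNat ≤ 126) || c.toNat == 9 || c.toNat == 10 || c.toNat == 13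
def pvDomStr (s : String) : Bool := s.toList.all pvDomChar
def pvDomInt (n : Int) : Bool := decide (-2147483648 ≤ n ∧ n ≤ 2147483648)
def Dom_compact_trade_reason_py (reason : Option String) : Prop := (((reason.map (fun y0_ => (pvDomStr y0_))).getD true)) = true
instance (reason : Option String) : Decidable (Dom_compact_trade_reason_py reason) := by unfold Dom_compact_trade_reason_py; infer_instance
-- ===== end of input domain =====

-- B replaces A's recursion + `or`-chaining + split(" ",1) by a single while loop over a
-- mutable current string with one most-recent-fallback variable and a prefix table (alternative decomposition).

-- ===== PORT A =====

-- str.removeprefix(p), exact (slice from len(p) when the prefix is present)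
def pyRemoveprefix (s p : String) : String :=
  if PySem.Str.startswith s p then PySem.Str.slice s (some (p.toList.length : Int)) none else s

def aMapping : PySem.Dict String (Option String) := ⟨[
  ("Bullish 1W", some "1W"),
  ("Bearish 1W", some "1W"),
  ("Bullish Fractal", some "F"),
  ("Bearish Fractal", some "F"),
  ("Bullish Add-on Fractal", some "AF"),
  ("Bearish Add-on Fractal", some "AF"),
  ("Bullish 1W-R", some "1W-R"),
  ("Bearish 1W-R", some "1W-R"),
  ("Bullish 1W Reversal", some "1W-R"),
  ("Bearish 1W Reversal", some "1W-R"),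
  ("Bullish 2W", some "2W"),
  ("Bearish 2W", some "2W"),
  ("Bullish 3W", none),
  ("Bearish 3W", none),
  ("Strategy Profit Protection Green Gator", some "G"),
  ("Strategy Profit Protection Red Gator", some "R"),
  ("Green Gator PP", some "G"),
  ("Red Gator PP", some "R"),
  ("Green Gator", some "G"),
  ("Red Gator", some "R"),
  ("Strategy Stop Loss Bullish 1W", some "S"),
  ("Strategy Stop Loss Bearish 1W", some "S"),
  ("1W Reversal Stop", some "S"),
  ("NTD Entry Stop", some "S"),
  ("Williams Zone PP", some "Z"),
  ("protective_stop", some "S"),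
  ("take_profit", some "TP"),
  ("Reduce", some "RED")]⟩

-- A's recursion, with a fuel counter as the totality guard only: every recursive call
-- passes a strictly shorter string, so fuel = |initial string| is never exhausted.
def aGo : Nat → String → Option String
  | fuel, reason =>
    let normalized := PySem.Str.strip reason
    if normalized = "" then none
    else
      match aMapping.get? normalized with
      | some v => v
      | none =>
        match fuel with
        | 0 => none   -- unreachable with the fuel chosen at the top level
        | fuel' + 1 =>
          if PySem.Str.startswith normalized "Signal Intent Flat from " then
            aGo fuel' (pyRemoveprefix normalized "Signal Intent Flat from ")
          else if PySem.Str.startswith normalized "Signal Intent Flip to " then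
            aGo fuel' (pyRemoveprefix normalized "Signal Intent Flip to ")
          else if PySem.Str.startswith normalized "Signal Intent Reduce from " then
            aGo fuel' (pyRemoveprefix normalized "Signal Intent Reduce from ")
          else if PySem.Str.startswith normalized "Strategy Exit Reason: " then
            aGo fuel' (pyRemoveprefix normalized "Strategy Exit Reason: ")
          else if PySem.Str.startswith normalized "Strategy Reversal to " then
            aGo fuel' (pyRemoveprefix normalized "Strategy Reversal to ")
          else if PySem.Str.startswith normalized "Bullish " || PySem.Str.startswith normalized "Bearish " then
            match PySem.Str.splitMax? normalized " " 1 with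
            | some parts =>
              if parts.length = 2 then
                -- `_compact_trade_reason(parts[1]) or parts[1]` (parts[1] is a str, hence the `some`)
                match aGo fuel' (parts.getD 1 "") with
                | some v => if v = "" then some (parts.getD 1 "") else some v
                | none => some (parts.getD 1 "")
              else some normalized
            | none => some normalized   -- unreachable: the separator " " is nonempty
          else some normalized

-- str(reason or "").strip() is applied inside aGo; None becomes ""
def compact_trade_reason_py (reason : Option String) : Option String :=
  aGo (reason.getD "").toList.length (reason.getD "")

-- ===== PORT B =====

def bMapping : PySem.Dict String (Option String) := ⟨[
  ("Bullish 1W", some "1W"),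
  ("Bearish 1W", some "1W"),
  ("Bullish Fractal", some "F"),
  ("Bearish Fractal", some "F"),
  ("Bullish Add-on Fractal", some "AF"),
  ("Bearish Add-on Fractal", some "AF"),
  ("Bullish 1W-R", some "1W-R"),
  ("Bearish 1W-R", some "1W-R"),
  ("Bullish 1W Reversal", some "1W-R"),
  ("Bearish 1W Reversal", some "1W-R"),
  ("Bullish 2W", some "2W"),
  ("Bearish 2W", some "2W"),
  ("Bullish 3W", none),
  ("Bearish 3W", none),
  ("Strategy Profit Protection Green Gator", some "G"),
  ("Strategy Profit Protection Red Gator", some "R"),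
  ("Green Gator PP", some "G"),
  ("Red Gator PP", some "R"),
  ("Green Gator", some "G"),
  ("Red Gator", some "R"),
  ("Strategy Stop Loss Bullish 1W", some "S"),
  ("Strategy Stop Loss Bearish 1W", some "S"),
  ("1W Reversal Stop", some "S"),
  ("NTD Entry Stop", some "S"),
  ("Williams Zone PP", some "Z"),
  ("protective_stop", some "S"),
  ("take_profit", some "TP"),
  ("Reduce", some "RED")]⟩

def bPrefixes : List String :=
  ["Signal Intent Flat from ",
   "Signal Intent Flip to ",
   "Signal Intent Reduce from ",
   "Strategy Exit Reason: ",
   "Strategy Reversal to "]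

-- B's while loop, with the same fuel-as-totality-guard (one unit per iteration; never exhausted)
def bLoop : Nat → Option String → String → Option String
  | fuel, fallback, current0 =>
    let current := PySem.Str.strip current0
    if current = "" then fallback
    else
      match bMapping.get? current with
      | some v =>
        -- `return _MAPPING[current] or fallback`
        match v with
        | some m => if m = "" then fallback else some m
        | none => fallback
      | none =>
        match fuel with
        | 0 => fallback   -- unreachable with the fuel chosen at the top level
        | fuel' + 1 =>
          -- `for prefix in _PREFIXES: if current.startswith(prefix): current = current[len(prefix):]; break`
          match bPrefixes.find? (fun p => PySem.Str.startswith current p) with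
          | some p => bLoop fuel' fallback (PySem.Str.slice current (some (p.toList.length : Int)) none)
          | none =>
            if PySem.Str.startswith current "Bullish " || PySem.Str.startswith current "Bearish " then
              -- `current = fallback = current[8:]`
              bLoop fuel' (some (PySem.Str.slice current (some 8) none)) (PySem.Str.slice current (some 8) none)
            else some current

def compact_trade_reason_py_alt (reason : Option String) : Option String :=
  bLoop (reason.getD "").toList.length none (reason.getD "")

-- ===== PRECONDITION & SPEC =====
def Spec_compact_trade_reason_py (reason : Option String) (out : Option String) : Prop := out = compact_trade_reason_py_alt reason
instance (reason : Option String) (out : Option String) : Decidable (Spec_compact_trade_reason_py reason out) := by unfold Spec_compact_trade_reason_py; infer_instance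

-- ===== CLAIM (what is proved, stated in full; the proofs are below) =====
def Claim_equal_compact_trade_reason_py : Prop := ∀ (reason : Option String), Dom_compact_trade_reason_py reason → Spec_compact_trade_reason_py reason (compact_trade_reason_py reason)

-- ===== LEMMAS AND PROOFS =====

-- Python `r or y` for r : Optional[str], y : Optional[str]
def por (r fb : Option String) : Option String :=
  match r with
  | some v => if v = "" then fb else some v
  | none => fb

theorem por_por (r fb s1 : Option String) (h : s1 ≠ some "") (h2 : s1 ≠ none) :
    por (por r s1) fb = por r s1 := by
  cases r with
  | none =>
    cases s1 with
    | none => simp at h2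
    | some v => simp [por]; intro hv; exact absurd (by simp [hv]) h
  | some v =>
    by_cases hv : v = "" <;> cases s1 with
    | none => simp_all [por]
    | some w =>
      all_goals simp_all [por]

theorem go_zero (fuel : Nat) (l cur : List Char) (acc : List (List Char)) :
    PySem.Chars.splitOnMax.go [' '] fuel 0 l cur acc = ((cur.reverse ++ l) :: acc).reverse := by
  cases fuel <;> cases l <;> simp [PySem.Chars.splitOnMax.go]

theorem go_one (pre : List Char) (hp : ∀ c ∈ pre, ¬ c = ' ') :
    ∀ (fuel : Nat) (rest cur : List Char) (acc : List (List Char)), pre.length < fuel →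
    PySem.Chars.splitOnMax.go [' '] fuel 1 (pre ++ ' ' :: rest) cur acc
      = acc.reverse ++ [cur.reverse ++ pre, rest] := by
  induction pre with
  | nil =>
    intro fuel rest cur acc hf
    cases fuel with
    | zero => omega
    | succ f => simp [PySem.Chars.splitOnMax.go, List.isPrefixOf, go_zero]
  | cons c pre ih =>
    intro fuel rest cur acc hf
    cases fuel with
    | zero => simp at hf
    | succ f =>
      have hc : ¬ c = ' ' := hp c (by simp)
      have : (List.isPrefixOf [' '] (c :: (pre ++ ' ' :: rest))) = false := by
        simp [List.isPrefixOf]; exact fun h => absurd h.symm hc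
      simp only [List.cons_append, PySem.Chars.splitOnMax.go, this]
      rw [ih (fun d hd => hp d (by simp [hd])) f rest (c :: cur) acc (by simp at hf ⊢; omega)]
      simp

theorem strip_no_trail (cs l : List Char) : PySem.Chars.strip cs ≠ l ++ [' '] := by
  intro h
  have h2 : List.dropWhile PySem.Chars.isspace (PySem.Chars.lstrip cs).reverse = ' ' :: l.reverse := by
    have := congrArg List.reverse h
    simpa [PySem.Chars.strip, PySem.Chars.rstrip] using this
  have hne : List.dropWhile PySem.Chars.isspace (PySem.Chars.lstrip cs).reverse ≠ [] := by
    simp [h2]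
  have := List.head_dropWhile_not PySem.Chars.isspace hne
  simp only [h2, List.head_cons] at this
  simp [PySem.Chars.isspace] at this

theorem splitMax_bull (n : String) (pre t : List Char) (hp : ∀ c ∈ pre, ¬ c = ' ')
    (h : n.toList = pre ++ ' ' :: t) :
    PySem.Str.splitMax? n " " 1 = some [String.ofList pre, String.ofList t] := by
  have hs : (" " : String).toList = [' '] := by decide
  simp only [PySem.Str.splitMax?, PySem.Chars.splitMax?, hs, PySem.Chars.splitOnMax, h]
  norm_num
  rw [go_one pre hp _ t [] [] (by simp)]
  simp

-- every value stored in the mapping is none or a nonempty string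
theorem mapping_val (n m : String) (h : aMapping.get? n = some (some m)) : m ≠ "" := by
  intro hm
  subst hm
  simp only [PySem.Dict.get?, Option.map_eq_some_iff] at h
  obtain ⟨p, hfind, hv⟩ := h
  have hmem := List.mem_of_find?_eq_some hfind
  have : (some "" : Option String) ∈ aMapping.items.map Prod.snd := by
    rw [← hv]; exact List.mem_map_of_mem hmem
  simp [aMapping] at this

-- a stripped string that starts with "<pre> " has a nonempty remainder after that space
theorem bull_branch (cur : String) (pre : List Char) (hsw : PySem.Chars.startswith (PySem.Str.strip cur).toList (pre ++ [' ']) = true) :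
    ∃ t : List Char, t ≠ [] ∧ (PySem.Str.strip cur).toList = pre ++ ' ' :: t := by
  rw [PySem.Chars.startswith_iff] at hsw
  obtain ⟨t, ht⟩ := hsw
  refine ⟨t, ?_, by rw [← ht]; simp⟩
  rintro rfl
  have h2 : PySem.Chars.strip cur.toList = pre ++ [' '] := by
    rw [← PySem.Str.toList_strip, ← ht]; simp
  exact strip_no_trail cur.toList pre h2

theorem ofList_ne_empty (t : List Char) (ht : t ≠ []) : String.ofList t ≠ "" := by
  intro h
  have := congrArg String.toList h
  simp at this
  exact ht this

-- the key invariant: B's loop result is A's recursive result, `or`-ed with the pending fallback,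
-- and A's result is never the truthy-falsy edge case `some ""`
theorem key : ∀ (fuel : Nat) (cur : String),
    aGo fuel cur ≠ some "" ∧ ∀ fb, bLoop fuel fb cur = por (aGo fuel cur) fb := by
  intro fuel
  induction fuel with
  | zero =>
    intro cur
    simp only [aGo, bLoop]
    by_cases hn : PySem.Str.strip cur = ""
    · simp [hn, por]
    · simp only [hn, if_false]
      cases h : aMapping.get? (PySem.Str.strip cur) with
      | none => simp [h, por, show bMapping = aMapping from rfl]
      | some v =>
        cases v with
        | none => simp [h, por, show bMapping = aMapping from rfl]
        | some m =>
          have hm := mapping_val _ _ h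
          simp [h, por, show bMapping = aMapping from rfl, hm]
  | succ f ih =>
    intro cur
    simp only [aGo, bLoop]
    by_cases hn : PySem.Str.strip cur = ""
    · simp [hn, por]
    · simp only [hn, if_false]
      cases hmap : aMapping.get? (PySem.Str.strip cur) with
      | some v =>
        cases v with
        | none => simp [hmap, por, show bMapping = aMapping from rfl]
        | some m =>
          have hm := mapping_val _ _ hmap
          simp [hmap, por, show bMapping = aMapping from rfl, hm]
      | none =>
        by_cases h1 : PySem.Str.startswith (PySem.Str.strip cur) "Signal Intent Flat from " = true
        · have hfind : List.find? (fun p => PySem.Str.startswith (PySem.Str.strip cur) p) bPrefixes = some "Signal Intent Flat from " := by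
            simp only [bPrefixes, List.find?, h1]
          have harg : PySem.Str.slice (PySem.Str.strip cur) (some ((("Signal Intent Flat from " : String).toList.length : Int))) none = pyRemoveprefix (PySem.Str.strip cur) "Signal Intent Flat from " := by
            unfold pyRemoveprefix
            rw [if_pos h1]
          obtain ⟨iha, ihb⟩ := ih (pyRemoveprefix (PySem.Str.strip cur) "Signal Intent Flat from ")
          refine ⟨?_, fun fb => ?_⟩
          · simp only [hmap, h1, Bool.false_eq_true, if_true, if_false]
            exact iha
          · simp only [show bMapping = aMapping from rfl, hmap, hfind, Bool.false_eq_true, h1, if_true, if_false]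
            rw [harg, ihb fb]
        · simp only [Bool.not_eq_true] at h1
          by_cases h2 : PySem.Str.startswith (PySem.Str.strip cur) "Signal Intent Flip to " = true
          · have hfind : List.find? (fun p => PySem.Str.startswith (PySem.Str.strip cur) p) bPrefixes = some "Signal Intent Flip to " := by
              simp only [bPrefixes, List.find?, h1, h2]
            have harg : PySem.Str.slice (PySem.Str.strip cur) (some ((("Signal Intent Flip to " : String).toList.length : Int))) none = pyRemoveprefix (PySem.Str.strip cur) "Signal Intent Flip to " := by
              unfold pyRemoveprefix
              rw [if_pos h2]
            obtain ⟨iha, ihb⟩ := ih (pyRemoveprefix (PySem.Str.strip cur) "Signal Intent Flip to ")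
            refine ⟨?_, fun fb => ?_⟩
            · simp only [hmap, h1, h2, Bool.false_eq_true, if_true, if_false]
              exact iha
            · simp only [show bMapping = aMapping from rfl, hmap, hfind, Bool.false_eq_true, h1, h2, if_true, if_false]
              rw [harg, ihb fb]
          · simp only [Bool.not_eq_true] at h2
            by_cases h3 : PySem.Str.startswith (PySem.Str.strip cur) "Signal Intent Reduce from " = true
            · have hfind : List.find? (fun p => PySem.Str.startswith (PySem.Str.strip cur) p) bPrefixes = some "Signal Intent Reduce from " := by
                simp only [bPrefixes, List.find?, h1, h2, h3]
              have harg : PySem.Str.slice (PySem.Str.strip cur) (some ((("Signal Intent Reduce from " : String).toList.length : Int))) none = pyRemoveprefix (PySem.Str.strip cur) "Signal Intent Reduce from " := by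
                unfold pyRemoveprefix
                rw [if_pos h3]
              obtain ⟨iha, ihb⟩ := ih (pyRemoveprefix (PySem.Str.strip cur) "Signal Intent Reduce from ")
              refine ⟨?_, fun fb => ?_⟩
              · simp only [hmap, h1, h2, h3, Bool.false_eq_true, if_true, if_false]
                exact iha
              · simp only [show bMapping = aMapping from rfl, hmap, hfind, Bool.false_eq_true, h1, h2, h3, if_true, if_false]
                rw [harg, ihb fb]
            · simp only [Bool.not_eq_true] at h3
              by_cases h4 : PySem.Str.startswith (PySem.Str.strip cur) "Strategy Exit Reason: " = true
              · have hfind : List.find? (fun p => PySem.Str.startswith (PySem.Str.strip cur) p) bPrefixes = some "Strategy Exit Reason: " := by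
                  simp only [bPrefixes, List.find?, h1, h2, h3, h4]
                have harg : PySem.Str.slice (PySem.Str.strip cur) (some ((("Strategy Exit Reason: " : String).toList.length : Int))) none = pyRemoveprefix (PySem.Str.strip cur) "Strategy Exit Reason: " := by
                  unfold pyRemoveprefix
                  rw [if_pos h4]
                obtain ⟨iha, ihb⟩ := ih (pyRemoveprefix (PySem.Str.strip cur) "Strategy Exit Reason: ")
                refine ⟨?_, fun fb => ?_⟩
                · simp only [hmap, h1, h2, h3, h4, Bool.false_eq_true, if_true, if_false]
                  exact iha
                · simp only [show bMapping = aMapping from rfl, hmap, hfind, Bool.false_eq_true, h1, h2, h3, h4, if_true, if_false]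
                  rw [harg, ihb fb]
              · simp only [Bool.not_eq_true] at h4
                by_cases h5 : PySem.Str.startswith (PySem.Str.strip cur) "Strategy Reversal to " = true
                · have hfind : List.find? (fun p => PySem.Str.startswith (PySem.Str.strip cur) p) bPrefixes = some "Strategy Reversal to " := by
                    simp only [bPrefixes, List.find?, h1, h2, h3, h4, h5]
                  have harg : PySem.Str.slice (PySem.Str.strip cur) (some ((("Strategy Reversal to " : String).toList.length : Int))) none = pyRemoveprefix (PySem.Str.strip cur) "Strategy Reversal to " := by
                    unfold pyRemoveprefix
                    rw [if_pos h5]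
                  obtain ⟨iha, ihb⟩ := ih (pyRemoveprefix (PySem.Str.strip cur) "Strategy Reversal to ")
                  refine ⟨?_, fun fb => ?_⟩
                  · simp only [hmap, h1, h2, h3, h4, h5, Bool.false_eq_true, if_true, if_false]
                    exact iha
                  · simp only [show bMapping = aMapping from rfl, hmap, hfind, Bool.false_eq_true, h1, h2, h3, h4, h5, if_true, if_false]
                    rw [harg, ihb fb]
                · simp only [Bool.not_eq_true] at h5
                  have hfind : List.find? (fun p => PySem.Str.startswith (PySem.Str.strip cur) p) bPrefixes = none := by
                    simp only [bPrefixes, List.find?, h1, h2, h3, h4, h5]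
                  by_cases hb : (PySem.Str.startswith (PySem.Str.strip cur) "Bullish " || PySem.Str.startswith (PySem.Str.strip cur) "Bearish ") = true
                  · -- the interesting branch: split at the first space vs drop 8 + the fallback variable
                    have hex : ∃ t : List Char, t ≠ [] ∧
                        ((PySem.Str.strip cur).toList = "Bullish".toList ++ ' ' :: t ∨
                         (PySem.Str.strip cur).toList = "Bearish".toList ++ ' ' :: t) := by
                      rcases Bool.or_eq_true_iff.mp hb with hsw | hsw
                      · obtain ⟨t, ht, hl⟩ := bull_branch cur "Bullish".toList
                          (by rw [show ("Bullish".toList ++ [' ']) = ("Bullish " : String).toList from by simp]; simpa using hsw)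
                        exact ⟨t, ht, Or.inl hl⟩
                      · obtain ⟨t, ht, hl⟩ := bull_branch cur "Bearish".toList
                          (by rw [show ("Bearish".toList ++ [' ']) = ("Bearish " : String).toList from by simp]; simpa using hsw)
                        exact ⟨t, ht, Or.inr hl⟩
                    obtain ⟨t, ht, hl⟩ := hex
                    have hOf : String.ofList t ≠ "" := ofList_ne_empty t ht
                    have hsplit : PySem.Str.splitMax? (PySem.Str.strip cur) " " 1 =
                        some [String.ofList (if (PySem.Str.strip cur).toList = "Bullish".toList ++ ' ' :: t then "Bullish".toList else "Bearish".toList), String.ofList t] := by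
                      rcases hl with hl | hl
                      · rw [if_pos hl]; exact splitMax_bull _ _ _ (by simp) hl
                      · rw [if_neg ?_]
                        · exact splitMax_bull _ _ _ (by simp) hl
                        · rw [hl]; intro hcon
                          have := congrArg (fun l => l.take 7) hcon
                          simp at this
                    have hl2 : PySem.Chars.strip cur.toList = "Bullish".toList ++ ' ' :: t ∨
                        PySem.Chars.strip cur.toList = "Bearish".toList ++ ' ' :: t := by
                      rw [← PySem.Str.toList_strip]; exact hl
                    have hslice : PySem.Str.slice (PySem.Str.strip cur) (some 8) none = String.ofList t := by
                      have h8 : PySem.List.slice (PySem.Chars.strip cur.toList) (some 8) none = t := by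
                        rw [PySem.List.slice_from _ (by norm_num)]
                        rcases hl2 with hl2 | hl2
                        · rw [hl2, show ((8 : Int).toNat) = ("Bullish".toList).length + 1 by simp, List.drop_append]
                          simp
                        · rw [hl2, show ((8 : Int).toNat) = ("Bearish".toList).length + 1 by simp, List.drop_append]
                          simp
                      simp [PySem.Str.slice, h8]
                    obtain ⟨iha, ihb⟩ := ih (String.ofList t)
                    have hgetD : ([String.ofList (if (PySem.Str.strip cur).toList = "Bullish".toList ++ ' ' :: t then "Bullish".toList else "Bearish".toList), String.ofList t].getD 1 "") = String.ofList t := by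
                      simp [List.getD]
                    refine ⟨?_, fun fb => ?_⟩
                    · simp only [hmap, h1, h2, h3, h4, h5, hb, Bool.false_eq_true, if_true, if_false, hsplit, hgetD]
                      norm_num
                      cases haGo : aGo f (String.ofList t) with
                      | none => simp [haGo, hOf]
                      | some v => by_cases hv : v = "" <;> simp [haGo, hv, hOf]
                    · simp only [show bMapping = aMapping from rfl, hmap, hfind, Bool.false_eq_true, h1, h2, h3, h4, h5, hb, Bool.false_eq_true, if_true, if_false, hsplit, hgetD, hslice]
                      norm_num
                      rw [ihb (some (String.ofList t))]
                      have hpp := por_por (aGo f (String.ofList t)) fb (some (String.ofList t)) (by simp [hOf]) (by simp)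
                      rw [← hpp]
                      cases haGo : aGo f (String.ofList t) with
                      | none => simp [haGo, por]
                      | some v => by_cases hv : v = "" <;> simp [haGo, por, hv]
                  · simp only [Bool.not_eq_true] at hb
                    refine ⟨?_, fun fb => ?_⟩ <;>
                      simp only [show bMapping = aMapping from rfl, hmap, hfind, h1, h2, h3, h4, h5, hb,
                        Bool.false_eq_true, if_false] <;>
                      simp [por, hn]

-- ===== VERDICT (by name: the statement is the Claim_ definition above) =====
theorem compact_trade_reason_py_spec : Claim_equal_compact_trade_reason_py := by
  intro reason _
  unfold Spec_compact_trade_reason_py compact_trade_reason_py compact_trade_reason_py_alt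
  obtain ⟨h1, h2⟩ := key (reason.getD "").toList.length (reason.getD "")
  rw [h2 none]
  cases h : aGo (reason.getD "").toList.length (reason.getD "") with
  | none => simp [por]
  | some v =>
    have : v ≠ "" := by intro hv; exact h1 (hv ▸ h)
    simp [por, this]
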